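-- pv_equiv track=rewrite | github.com/Alonbbar6/CvAppGames | expression_matching_game.py | get_primary_face
-- ===== SOURCE A (Python) =====
-- def get_primary_face(faces, frame_h, frame_w):
--     primary_face_index = None
--     face_height_max = 0
--     for idx in range(len(faces)):
--         face = faces[idx]
--         x1 = face[0]
--         y1 = face[1]
--         x2 = x1 + face[2]
--         y2 = y1 + face[3]
--         if x1 > frame_w or y1 > frame_h or x2 > frame_w or y2 > frame_h:
--             continue
--         if x1 < 0 or y1 < 0 or x2 < 0 or y2 < 0:
--             continue
--         if face[3] > face_height_max:
--             primary_face_index = idx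
--             face_height_max = face[3]
--
--     if primary_face_index is not None:
--         primary_face = faces[primary_face_index]
--     else:
--         primary_face = None
--
--     return primary_face
-- ===== SOURCE B (Python) =====
-- def get_primary_face(faces, frame_h, frame_w):
--     candidates = [f for f in faces
--                   if 0 <= f[0] <= frame_w and 0 <= f[1] <= frame_h
--                   and 0 <= f[0] + f[2] <= frame_w and 0 <= f[1] + f[3] <= frame_h
--                   and f[3] > 0]
--     ranked = sorted(candidates, key=lambda f: -f[3])
--     return ranked[0] if ranked else None
-- ===== Notes on version B (the rewrite author's own statement) =====
-- stated objective: alternative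
-- what changed: Replaces A's single-pass running-max with manual index bookkeeping by ranking: filter the in-bounds positive-height candidates, stably sort them by descending height, and return the head of the ranking (stability makes the head the first maximal face, matching A's tie-breaking).
import Mathlib
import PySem

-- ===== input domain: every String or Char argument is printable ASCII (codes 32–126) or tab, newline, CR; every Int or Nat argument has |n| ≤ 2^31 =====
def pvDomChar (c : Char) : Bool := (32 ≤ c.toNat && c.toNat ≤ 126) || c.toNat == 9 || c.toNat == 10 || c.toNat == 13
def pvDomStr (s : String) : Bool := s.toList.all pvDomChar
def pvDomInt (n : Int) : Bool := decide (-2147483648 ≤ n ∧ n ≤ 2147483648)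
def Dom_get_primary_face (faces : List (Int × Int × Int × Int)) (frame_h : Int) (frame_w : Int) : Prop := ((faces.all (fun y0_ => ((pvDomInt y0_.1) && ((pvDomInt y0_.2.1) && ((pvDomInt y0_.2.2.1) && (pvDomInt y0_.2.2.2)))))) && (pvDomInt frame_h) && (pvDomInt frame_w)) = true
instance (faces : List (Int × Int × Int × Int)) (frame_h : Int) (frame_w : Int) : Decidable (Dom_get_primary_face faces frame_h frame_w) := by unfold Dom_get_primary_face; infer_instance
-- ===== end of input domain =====

-- B replaces A's running-max loop with manual index bookkeeping by rank-then-pick: filter the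
-- in-bounds positive-height candidates, stably sort them by descending height, return the head.

-- ===== PORT A =====
-- loop body of A's `for idx in range(len(faces))` loop, state = (primary_face_index, face_height_max)
def get_primary_face_step (frame_h : Int) (frame_w : Int)
    (st : Option Int × Int) (p : Int × (Int × Int × Int × Int)) : Option Int × Int :=
  let face := p.2
  let x1 := face.1
  let y1 := face.2.1
  let x2 := x1 + face.2.2.1
  let y2 := y1 + face.2.2.2
  if x1 > frame_w ∨ y1 > frame_h ∨ x2 > frame_w ∨ y2 > frame_h then st
  else if x1 < 0 ∨ y1 < 0 ∨ x2 < 0 ∨ y2 < 0 then st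
  else if face.2.2.2 > st.2 then (some p.1, face.2.2.2) else st

def get_primary_face (faces : List (Int × Int × Int × Int)) (frame_h : Int) (frame_w : Int) : Option (Int × Int × Int × Int) :=
  let st := (PySem.List.enumerate faces 0).foldl (get_primary_face_step frame_h frame_w) (none, 0)
  match st.1 with
  | some i => PySem.List.pyGet? faces i    -- faces[primary_face_index]; the index is always in range
  | none => none

-- ===== PORT B =====
def get_primary_face_inb (frame_h : Int) (frame_w : Int) (f : Int × Int × Int × Int) : Bool :=
  decide (0 ≤ f.1 ∧ f.1 ≤ frame_w ∧ 0 ≤ f.2.1 ∧ f.2.1 ≤ frame_h ∧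
          0 ≤ f.1 + f.2.2.1 ∧ f.1 + f.2.2.1 ≤ frame_w ∧
          0 ≤ f.2.1 + f.2.2.2 ∧ f.2.1 + f.2.2.2 ≤ frame_h ∧ f.2.2.2 > 0)

def get_primary_face_alt (faces : List (Int × Int × Int × Int)) (frame_h : Int) (frame_w : Int) : Option (Int × Int × Int × Int) :=
  let candidates := faces.filter (get_primary_face_inb frame_h frame_w)
  let ranked := PySem.List.sorted candidates (fun f => -f.2.2.2) false
  match ranked with
  | m :: _ => some m   -- ranked[0] if ranked else None
  | [] => none

-- ===== PRECONDITION & SPEC =====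
def Spec_get_primary_face (faces : List (Int × Int × Int × Int)) (frame_h : Int) (frame_w : Int) (out : Option (Int × Int × Int × Int)) : Prop := out = get_primary_face_alt faces frame_h frame_w
instance (faces : List (Int × Int × Int × Int)) (frame_h : Int) (frame_w : Int) (out : Option (Int × Int × Int × Int)) : Decidable (Spec_get_primary_face faces frame_h frame_w out) := by unfold Spec_get_primary_face; infer_instance

-- ===== CLAIM (what is proved, stated in full; the proofs are below) =====
def Claim_equal_get_primary_face : Prop := ∀ (faces : List (Int × Int × Int × Int)) (frame_h : Int) (frame_w : Int), Dom_get_primary_face faces frame_h frame_w → Spec_get_primary_face faces frame_h frame_w (get_primary_face faces frame_h frame_w)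

-- ===== LEMMAS AND PROOFS =====

-- max? over a list extended by one element = one comparison step on max? of the prefix
theorem pv_max?_append_none (xs : List (Int × Int × Int × Int)) (a : Int × Int × Int × Int)
    (k : (Int × Int × Int × Int) → Int) (h : PySem.List.max? xs k = none) :
    PySem.List.max? (xs ++ [a]) k = some a := by
  unfold PySem.List.max? at h ⊢
  rw [List.foldl_append, h]
  rfl

theorem pv_max?_append_some (xs : List (Int × Int × Int × Int)) (a m : Int × Int × Int × Int)
    (k : (Int × Int × Int × Int) → Int) (h : PySem.List.max? xs k = some m) :
    PySem.List.max? (xs ++ [a]) k = if k m < k a then some a else some m := by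
  unfold PySem.List.max? at h ⊢
  rw [List.foldl_append, h]
  rfl

-- the head of the stable sort by descending height is the FIRST maximal-height element,
-- i.e. exactly Python's max(..., key=height)
theorem pv_head_sorted_neg (xs : List (Int × Int × Int × Int)) :
    (PySem.List.sorted xs (fun f => -f.2.2.2) false).head? =
      PySem.List.max? xs (fun f => f.2.2.2) := by
  induction xs using List.reverseRecOn with
  | nil => rfl
  | append_singleton xs a ih =>
    rw [PySem.List.sorted_eq_foldl_insertBy] at ih ⊢
    rw [List.foldl_append]
    simp only [List.foldl_cons, List.foldl_nil]
    set l := List.foldl (fun acc x => PySem.List.insertBy (fun a b => decide (-a.2.2.2 < -b.2.2.2)) x acc) [] xs with hl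
    have hsplit : l = [] ∨ ∃ m t, l = m :: t := by
      cases l with
      | nil => exact Or.inl rfl
      | cons m t => exact Or.inr ⟨m, t, rfl⟩
    rcases hsplit with hcase | ⟨m, t, hcase⟩
    · rw [hcase] at ih
      rw [pv_max?_append_none _ _ _ ih.symm, hcase]
      rfl
    · rw [hcase] at ih
      simp only [List.head?] at ih
      rw [pv_max?_append_some _ _ _ _ ih.symm, hcase]
      simp only [PySem.List.insertBy]
      by_cases h : m.2.2.2 < a.2.2.2
      · rw [if_pos (by simp; omega), if_pos h]
        rfl
      · rw [if_neg (by simp; omega), if_neg h]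
        rfl

-- loop invariant for A's fold: its state names the first maximal candidate, described via max?
def pv_inv (frame_h frame_w : Int) (l : List (Int × Int × Int × Int)) (st : Option Int × Int) : Prop :=
  (st = (none, 0) ∧
     PySem.List.max? (l.filter (get_primary_face_inb frame_h frame_w)) (fun f => f.2.2.2) = none) ∨
  (∃ (i : Nat) (f : Int × Int × Int × Int),
     st.1 = some (i : Int) ∧ i < l.length ∧ l[i]? = some f ∧
     PySem.List.max? (l.filter (get_primary_face_inb frame_h frame_w)) (fun f => f.2.2.2) = some f ∧
     st.2 = f.2.2.2 ∧ 0 < f.2.2.2)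

theorem pv_inv_holds (frame_h frame_w : Int) (l : List (Int × Int × Int × Int)) :
    pv_inv frame_h frame_w l ((PySem.List.enumerate l 0).foldl (get_primary_face_step frame_h frame_w) (none, 0)) := by
  induction l using List.reverseRecOn with
  | nil =>
    left
    simp [PySem.List.enumerate_nil, PySem.List.max?]
  | append_singleton xs a ih =>
    rw [PySem.List.enumerate_append, PySem.List.enumerate_cons, PySem.List.enumerate_nil,
        List.foldl_append]
    simp only [List.foldl_cons, List.foldl_nil]
    set st := (PySem.List.enumerate xs 0).foldl (get_primary_face_step frame_h frame_w) (none, 0) with hst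
    unfold pv_inv at ih ⊢
    rw [List.filter_append]
    by_cases hcand : get_primary_face_inb frame_h frame_w a = true
    · -- a is a candidate: in bounds and positive height
      have hfa : List.filter (get_primary_face_inb frame_h frame_w) [a] = [a] := by
        simp [hcand]
      rw [hfa]
      have hcand' := hcand
      simp only [get_primary_face_inb, decide_eq_true_eq] at hcand'
      obtain ⟨h1, h2, h3, h4, h5, h6, h7, h8, hpos⟩ := hcand'
      have hstep : get_primary_face_step frame_h frame_w st (0 + ↑xs.length, a) =
          if a.2.2.2 > st.2 then (some ((xs.length : Nat) : Int), a.2.2.2) else st := by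
        simp only [get_primary_face_step]
        rw [if_neg (by omega), if_neg (by omega)]
        simp
      rw [hstep]
      rcases ih with ⟨hst0, hmax⟩ | ⟨i, f, hi1, hi2, hi3, hmax, hh, hfpos⟩
      · rw [pv_max?_append_none _ _ _ hmax, hst0]
        rw [if_pos (by simpa using hpos)]
        right
        exact ⟨xs.length, a, rfl, by simp, by simp, rfl, rfl, hpos⟩
      · rw [pv_max?_append_some _ _ _ _ hmax]
        by_cases hgt : a.2.2.2 > st.2
        · rw [if_pos hgt, if_pos (by omega)]
          right
          exact ⟨xs.length, a, rfl, by simp, by simp, rfl, rfl, hpos⟩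
        · rw [if_neg hgt, if_neg (by omega)]
          right
          refine ⟨i, f, hi1, by simpa using Nat.lt_succ_of_lt hi2, ?_, rfl, hh, hfpos⟩
          rw [List.getElem?_append_left hi2]; exact hi3
    · -- a fails bounds or has non-positive height: loop state and candidates unchanged
      have hfe : List.filter (get_primary_face_inb frame_h frame_w) [a] = [] := by
        simp [hcand]
      rw [hfe, List.append_nil]
      have hstep : get_primary_face_step frame_h frame_w st (0 + ↑xs.length, a) = st := by
        simp only [get_primary_face_inb, decide_eq_true_eq, not_and_or] at hcand
        simp only [get_primary_face_step]
        by_cases hover : a.1 > frame_w ∨ a.2.1 > frame_h ∨ a.1 + a.2.2.1 > frame_w ∨ a.2.1 + a.2.2.2 > frame_h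
        · rw [if_pos hover]
        · rw [if_neg hover]
          by_cases hund : a.1 < 0 ∨ a.2.1 < 0 ∨ a.1 + a.2.2.1 < 0 ∨ a.2.1 + a.2.2.2 < 0
          · rw [if_pos hund]
          · rw [if_neg hund]
            push Not at hover hund
            rcases hcand with h|h|h|h|h|h|h|h|h
            · omega
            · omega
            · omega
            · omega
            · omega
            · omega
            · omega
            · omega
            · -- height ≤ 0, but running max ≥ 0 always
              have hmax0 : 0 ≤ st.2 := by
                rcases ih with ⟨hst0, _⟩ | ⟨_, f, _, _, _, _, hh, hfpos⟩
                · rw [hst0]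
                · omega
              rw [if_neg (by omega)]
      rw [hstep]
      rcases ih with ⟨hst0, hmax⟩ | ⟨i, f, hi1, hi2, hi3, hmax, hh, hfpos⟩
      · exact Or.inl ⟨hst0, hmax⟩
      · right
        refine ⟨i, f, hi1, by simpa using Nat.lt_succ_of_lt hi2, ?_, hmax, hh, hfpos⟩
        rw [List.getElem?_append_left hi2]; exact hi3

-- ===== VERDICT (by name: the statement is the Claim_ definition above) =====
theorem get_primary_face_spec : Claim_equal_get_primary_face := by
  intro faces frame_h frame_w _
  unfold Spec_get_primary_face get_primary_face get_primary_face_alt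
  have h := pv_inv_holds frame_h frame_w faces
  unfold pv_inv at h
  have hhead := pv_head_sorted_neg (faces.filter (get_primary_face_inb frame_h frame_w))
  rcases h with ⟨hst0, hmax⟩ | ⟨i, f, hi1, hi2, hi3, hmax, _, _⟩
  · rw [hmax] at hhead
    simp only [hst0]
    cases hc : PySem.List.sorted (faces.filter (get_primary_face_inb frame_h frame_w)) (fun f => -f.2.2.2) false with
    | nil => rfl
    | cons m t => rw [hc] at hhead; simp at hhead
  · rw [hmax] at hhead
    simp only [hi1, PySem.List.pyGet?_natCast]
    cases hc : PySem.List.sorted (faces.filter (get_primary_face_inb frame_h frame_w)) (fun f => -f.2.2.2) false with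
    | nil => rw [hc] at hhead; simp at hhead
    | cons m t =>
      rw [hc] at hhead
      simp only [List.head?] at hhead
      rw [hi3]
      exact congrArg some (Option.some_injective _ hhead.symm)
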